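-- pv_equiv track=rewrite | github.com/e-erdolu/Tracing_Interdisciplinary_Design_Conversations | text_processing/conversation_TextProcessing_V3.py | makeWordListsByActor
-- ===== SOURCE A (Python) =====
-- actor1 = "Paul_Goldberger"
--
-- actor2 = "Tony_Fadell"
--
-- actor3 = "Rem_Koolhaas"
--
-- def makeWordListsByActor(words):
--     wordList1 = []
--     wordList2 = []
--     wordList3 = []
--     actor1_On = False
--     actor2_On = False
--     actor3_On = False
--
--     for word in words:
--         ## Capturing actors' name in the corpus
--         if word == actor1:
--             actor1_On = True
--             actor2_On = False
--             actor3_On = False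
--         elif word == actor2:
--             actor1_On = False
--             actor2_On = True
--             actor3_On = False
--         elif word == actor3:
--             actor1_On = False
--             actor2_On = False
--             actor3_On = True
--
--         ## Words in actors' phrases
--         if actor1_On == True and word != actor1:
--             wordList1.append(word)
--         elif actor2_On == True and word != actor2:
--             wordList2.append(word)
--         elif actor3_On == True and word != actor3:
--             wordList3.append(word)
--
--     return wordList1, wordList2, wordList3
-- ===== SOURCE B (Python) =====
-- ACTORS = ("Paul_Goldberger", "Tony_Fadell", "Rem_Koolhaas")
--
-- def makeWordListsByActor(words):
--     # One pass tags each spoken word with its speaker; three filters split the tags.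
--     tagged = []
--     cur = None
--     for w in words:
--         if w in ACTORS:
--             cur = w
--         elif cur is not None:
--             tagged.append((cur, w))
--     return ([w for c, w in tagged if c == ACTORS[0]],
--             [w for c, w in tagged if c == ACTORS[1]],
--             [w for c, w in tagged if c == ACTORS[2]])
-- ===== Notes on version B (the rewrite author's own statement) =====
-- stated objective: alternative
-- what changed: Replaces the three boolean flags and three separately-maintained lists with a single pass that tags each spoken word with its current speaker, followed by three filters that split the tagged stream into the per-actor lists.
import Mathlib
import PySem

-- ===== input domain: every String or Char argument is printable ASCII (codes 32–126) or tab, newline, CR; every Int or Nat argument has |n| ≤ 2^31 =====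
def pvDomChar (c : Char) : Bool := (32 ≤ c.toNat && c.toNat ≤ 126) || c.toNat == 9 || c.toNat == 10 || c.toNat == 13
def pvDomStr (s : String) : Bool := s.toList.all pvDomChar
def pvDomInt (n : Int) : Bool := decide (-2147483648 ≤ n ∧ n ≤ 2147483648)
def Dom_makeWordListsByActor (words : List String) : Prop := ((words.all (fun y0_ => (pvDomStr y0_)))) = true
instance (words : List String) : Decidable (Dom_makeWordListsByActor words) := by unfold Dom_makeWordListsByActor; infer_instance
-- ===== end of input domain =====

-- B replaces A's three boolean flags and three list accumulators with one tagging pass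
-- (speaker, word) plus three filters; objective: alternative decomposition, same cost.

-- ===== PORT A =====
def pvActor1 : String := "Paul_Goldberger"
def pvActor2 : String := "Tony_Fadell"
def pvActor3 : String := "Rem_Koolhaas"

-- literal transliteration of A's loop: state = (wordList1, wordList2, wordList3, a1_On, a2_On, a3_On)
def pvStepA (s : List String × List String × List String × Bool × Bool × Bool) (word : String) :
    List String × List String × List String × Bool × Bool × Bool :=
  let (wl1, wl2, wl3, a1, a2, a3) := s
  let (a1, a2, a3) :=
    if word = pvActor1 then (true, false, false)
    else if word = pvActor2 then (false, true, false)
    else if word = pvActor3 then (false, false, true)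
    else (a1, a2, a3)
  if a1 = true ∧ word ≠ pvActor1 then (wl1 ++ [word], wl2, wl3, a1, a2, a3)
  else if a2 = true ∧ word ≠ pvActor2 then (wl1, wl2 ++ [word], wl3, a1, a2, a3)
  else if a3 = true ∧ word ≠ pvActor3 then (wl1, wl2, wl3 ++ [word], a1, a2, a3)
  else (wl1, wl2, wl3, a1, a2, a3)

def makeWordListsByActor (words : List String) : List String × List String × List String :=
  let st := words.foldl pvStepA ([], [], [], false, false, false)
  (st.1, st.2.1, st.2.2.1)

-- ===== PORT B =====
def pvActors : List String := [pvActor1, pvActor2, pvActor3]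

-- the tagging pass of Source B: cur is the current speaker (None before any actor name)
def pvTag : Option String → List String → List (String × String)
  | _, [] => []
  | cur, w :: ws =>
    if w ∈ pvActors then pvTag (some w) ws
    else match cur with
      | some c => (c, w) :: pvTag (some c) ws
      | none => pvTag none ws

def makeWordListsByActor_alt (words : List String) : List String × List String × List String :=
  let tagged := pvTag none words
  ((tagged.filter (fun p => p.1 == pvActors[0]!)).map (fun p => p.2),
   (tagged.filter (fun p => p.1 == pvActors[1]!)).map (fun p => p.2),
   (tagged.filter (fun p => p.1 == pvActors[2]!)).map (fun p => p.2))

-- ===== PRECONDITION & SPEC =====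
def Spec_makeWordListsByActor (words : List String) (out : List String × List String × List String) : Prop := out = makeWordListsByActor_alt words
instance (words : List String) (out : List String × List String × List String) : Decidable (Spec_makeWordListsByActor words out) := by unfold Spec_makeWordListsByActor; infer_instance

-- ===== CLAIM (what is proved, stated in full; the proofs are below) =====
def Claim_equal_makeWordListsByActor : Prop := ∀ (words : List String), Dom_makeWordListsByActor words → Spec_makeWordListsByActor words (makeWordListsByActor words)

-- ===== LEMMAS AND PROOFS =====

-- the three per-actor projections of the tagged stream
def pvOut (cur : Option String) (ws : List String) (i : Nat) : List String :=
  ((pvTag cur ws).filter (fun p => p.1 == pvActors[i]!)).map (fun p => p.2)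

def pvFlags : Option String → Bool × Bool × Bool
  | some c => (c == pvActor1, c == pvActor2, c == pvActor3)
  | none => (false, false, false)

-- final value of cur after the tagging pass (tracks A's flags)
def pvTagLast : Option String → List String → Option String
  | cur, [] => cur
  | cur, w :: ws => if w ∈ pvActors then pvTagLast (some w) ws else pvTagLast cur ws

lemma pvLoop_eq (ws : List String) : ∀ (l1 l2 l3 : List String) (cur : Option String),
    (cur = none ∨ cur = some pvActor1 ∨ cur = some pvActor2 ∨ cur = some pvActor3) →
    ws.foldl pvStepA (l1, l2, l3, (pvFlags cur).1, (pvFlags cur).2.1, (pvFlags cur).2.2) =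
      (l1 ++ pvOut cur ws 0, l2 ++ pvOut cur ws 1, l3 ++ pvOut cur ws 2,
        (pvFlags (pvTagLast cur ws)).1, (pvFlags (pvTagLast cur ws)).2.1,
        (pvFlags (pvTagLast cur ws)).2.2) := by
  induction ws with
  | nil => intro l1 l2 l3 cur hcur; simp [pvOut, pvTag, pvTagLast]
  | cons w ws ih =>
    intro l1 l2 l3 cur hcur
    by_cases h1 : w = pvActor1
    · subst h1
      have := ih (l1) l2 l3 (some pvActor1) (by simp)
      simp [pvStepA, pvOut, pvTag, pvTagLast, pvActors, pvFlags] at this ⊢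
      rcases hcur with h|h|h|h <;> subst h <;>
        simp [pvActor1, pvActor2, pvActor3] <;>
        simpa [pvOut, pvActors, pvFlags, pvActor1, pvActor2, pvActor3] using this
    · by_cases h2 : w = pvActor2
      · subst h2
        have := ih l1 l2 l3 (some pvActor2) (by simp)
        simp [pvStepA, pvOut, pvTag, pvTagLast, pvActors, pvFlags, h1] at this ⊢
        rcases hcur with h|h|h|h <;> subst h <;>
          simp [pvActor1, pvActor2, pvActor3] <;>
          simpa [pvOut, pvActors, pvFlags, pvActor1, pvActor2, pvActor3] using this
      · by_cases h3 : w = pvActor3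
        · subst h3
          have := ih l1 l2 l3 (some pvActor3) (by simp)
          simp [pvStepA, pvOut, pvTag, pvTagLast, pvActors, pvFlags, h1, h2] at this ⊢
          rcases hcur with h|h|h|h <;> subst h <;>
            simp [pvActor1, pvActor2, pvActor3] <;>
            simpa [pvOut, pvActors, pvFlags, pvActor1, pvActor2, pvActor3] using this
        · simp only [pvActor1, pvActor2, pvActor3] at h1 h2 h3
          rcases hcur with h|h|h|h <;> subst h
          · have := ih l1 l2 l3 none (by simp)
            simpa [pvStepA, pvOut, pvTag, pvTagLast, pvActors, pvFlags, h1, h2, h3,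
              pvActor1, pvActor2, pvActor3] using this
          · have := ih (l1 ++ [w]) l2 l3 (some pvActor1) (by simp)
            simpa [pvStepA, pvOut, pvTag, pvTagLast, pvActors, pvFlags, h1, h2, h3,
              pvActor1, pvActor2, pvActor3] using this
          · have := ih l1 (l2 ++ [w]) l3 (some pvActor2) (by simp)
            simpa [pvStepA, pvOut, pvTag, pvTagLast, pvActors, pvFlags, h1, h2, h3,
              pvActor1, pvActor2, pvActor3] using this
          · have := ih l1 l2 (l3 ++ [w]) (some pvActor3) (by simp)
            simpa [pvStepA, pvOut, pvTag, pvTagLast, pvActors, pvFlags, h1, h2, h3,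
              pvActor1, pvActor2, pvActor3] using this

theorem makeWordListsByActor_spec : Claim_equal_makeWordListsByActor := by
  intro words _
  show _ = _
  have := pvLoop_eq words [] [] [] none (by simp)
  simp [pvFlags] at this
  simp [makeWordListsByActor, makeWordListsByActor_alt, this, pvOut, pvActors]
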